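-- pv_equiv track=rewrite | github.com/summercomplaint/fractaldice | showmin.py | statefrombinary
-- ===== SOURCE A (Python) =====
-- def statefrombinary(boundary,tile):
--     state=[[0]*4 for i in range(4)]
--     boundarylist=[(0,0),(0,1),(0,2),(1,0),(1,3),(2,0),(2,2),(3,1),(3,2)]
--     tilelist=[(1,1),(1,2),(2,1)]
--
--
--     for k, el in enumerate(boundary):
--         i,j=boundarylist[k]
--         state[i][j]=el
--
--
--     for k, el in enumerate(tile):
--         i,j=tilelist[k]
--         state[i][j]=el
--
--     return(state)
-- ===== SOURCE B (Python) =====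
-- def statefrombinary(boundary, tile):
--     # Gather formulation: each cell looks itself up in the fixed coordinate
--     # tables (tile positions shadow boundary positions) and reads the value
--     # straight out of the input list; cells named by neither table are 0.
--     boundarylist = [(0, 0), (0, 1), (0, 2), (1, 0), (1, 3), (2, 0), (2, 2), (3, 1), (3, 2)]
--     tilelist = [(1, 1), (1, 2), (2, 1)]
--
--     def cell(p):
--         if p in tilelist:
--             k = tilelist.index(p)
--             return tile[k] if k < len(tile) else 0
--         if p in boundarylist:
--             k = boundarylist.index(p)
--             return boundary[k] if k < len(boundary) else 0
--         return 0
--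
--     return [[cell((i, j)) for j in range(4)] for i in range(4)]
-- ===== Notes on version B (the rewrite author's own statement) =====
-- stated objective: alternative
-- what changed: A scatters: it allocates a zero grid and mutates cells by looping over the inputs; B gathers: it never builds or mutates a grid, instead each of the 16 cells inverts the fixed coordinate tables with .index() and reads its value directly out of tile/boundary (tile positions first, 0 when the position is unnamed or the input is too short).
import Mathlib
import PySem

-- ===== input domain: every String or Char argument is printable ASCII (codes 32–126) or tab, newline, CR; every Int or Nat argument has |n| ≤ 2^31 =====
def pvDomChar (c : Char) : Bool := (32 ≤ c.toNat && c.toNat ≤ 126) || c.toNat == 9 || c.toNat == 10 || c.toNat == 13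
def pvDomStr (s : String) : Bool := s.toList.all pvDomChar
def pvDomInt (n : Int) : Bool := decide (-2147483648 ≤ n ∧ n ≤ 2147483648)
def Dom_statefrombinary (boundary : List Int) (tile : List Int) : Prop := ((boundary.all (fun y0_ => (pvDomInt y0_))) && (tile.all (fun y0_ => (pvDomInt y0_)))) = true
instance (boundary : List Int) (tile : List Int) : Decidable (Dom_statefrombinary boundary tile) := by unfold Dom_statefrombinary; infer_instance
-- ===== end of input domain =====

-- B replaces A's scatter (allocate a zero grid, mutate cells while looping over the
-- inputs) by a gather: each cell inverts the fixed coordinate tables with .index()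
-- and reads its value straight from tile/boundary (alternative decomposition).

-- the two fixed coordinate tables (same constants in both Pythons)
def pvBoundarylist : List (Int × Int) := [(0,0),(0,1),(0,2),(1,0),(1,3),(2,0),(2,2),(3,1),(3,2)]
def pvTilelist : List (Int × Int) := [(1,1),(1,2),(2,1)]

-- ===== PORT A =====
-- state[i][j] = el  (the fixed table coordinates, always non-negative here)
def pvSet2 (st : List (List Int)) (i j : Int) (el : Int) : List (List Int) :=
  st.set i.toNat ((st.getD i.toNat []).set j.toNat el)

def statefrombinary (boundary : List Int) (tile : List Int) : List (List Int) :=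
  -- state = [[0]*4 for i in range(4)]
  let state : List (List Int) := (List.range 4).map (fun _ => (List.range 4).map (fun _ => (0 : Int)))
  -- for k, el in enumerate(boundary): i,j = boundarylist[k]; state[i][j] = el
  -- (boundarylist[k] raises IndexError when k ≥ 9; such inputs are excluded by Pre_)
  let state := (PySem.List.enumerate boundary).foldl
    (fun st ke =>
      pvSet2 st (PySem.List.pyGetD pvBoundarylist ke.1 (0, 0)).1
        (PySem.List.pyGetD pvBoundarylist ke.1 (0, 0)).2 ke.2) state
  -- for k, el in enumerate(tile): i,j = tilelist[k]; state[i][j] = el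
  let state := (PySem.List.enumerate tile).foldl
    (fun st ke =>
      pvSet2 st (PySem.List.pyGetD pvTilelist ke.1 (0, 0)).1
        (PySem.List.pyGetD pvTilelist ke.1 (0, 0)).2 ke.2) state
  state

-- ===== PORT B =====
-- def cell(p): inverse lookup of p in the fixed tables, then read the input list
def pvCellB (boundary : List Int) (tile : List Int) (p : Int × Int) : Int :=
  match PySem.List.index? pvTilelist p with
  | some k => if (k : Int) < tile.length then PySem.List.pyGetD tile (k : Int) 0 else 0
  | none =>
    match PySem.List.index? pvBoundarylist p with
    | some k => if (k : Int) < boundary.length then PySem.List.pyGetD boundary (k : Int) 0 else 0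
    | none => 0

def statefrombinary_alt (boundary : List Int) (tile : List Int) : List (List Int) :=
  -- [[cell((i, j)) for j in range(4)] for i in range(4)]
  (PySem.List.pyRange 0 4 1).map (fun i =>
    (PySem.List.pyRange 0 4 1).map (fun j => pvCellB boundary tile (i, j)))

-- ===== PRECONDITION & SPEC =====
-- Pre_ excludes exactly the inputs on which A raises IndexError (boundarylist[k]/tilelist[k] out of range).
def Pre_statefrombinary (boundary : List Int) (tile : List Int) : Prop :=
  boundary.length ≤ 9 ∧ tile.length ≤ 3
instance (boundary : List Int) (tile : List Int) : Decidable (Pre_statefrombinary boundary tile) := by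
  unfold Pre_statefrombinary; infer_instance

def pvWitness_statefrombinary : List Int × List Int := ([1, 0, 1, 1], [1, 0])

def Spec_statefrombinary (boundary : List Int) (tile : List Int) (out : List (List Int)) : Prop := out = statefrombinary_alt boundary tile
instance (boundary : List Int) (tile : List Int) (out : List (List Int)) : Decidable (Spec_statefrombinary boundary tile out) := by unfold Spec_statefrombinary; infer_instance

-- ===== CLAIM (what is proved, stated in full; the proofs are below) =====
def Claim_equal_statefrombinary : Prop := ∀ (boundary : List Int) (tile : List Int), Dom_statefrombinary boundary tile → Pre_statefrombinary boundary tile → Spec_statefrombinary boundary tile (statefrombinary boundary tile)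

-- ===== LEMMAS AND PROOFS =====

-- the grid whose cell (i,j) holds g (i,j)
def pvGridOf (g : Int × Int → Int) : List (List Int) :=
  (PySem.List.pyRange 0 4 1).map (fun i =>
    (PySem.List.pyRange 0 4 1).map (fun j => g (i, j)))

-- a coordinate pair that hits the 4x4 grid
def pvOK (p : Int × Int) : Prop := 0 ≤ p.1 ∧ p.1 < 4 ∧ 0 ≤ p.2 ∧ p.2 < 4

-- the cell function after one A-loop over xs with table tbl, starting from cells g
def pvAfter (tbl : List (Int × Int)) (xs : List Int) (g : Int × Int → Int) (p : Int × Int) : Int :=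
  match PySem.List.index? tbl p with
  | some k => if (k : Int) < xs.length then PySem.List.pyGetD xs (k : Int) 0 else g p
  | none => g p

lemma pvRange4 : PySem.List.pyRange 0 4 1 = [0, 1, 2, 3] := by decide

lemma pvGridOf_congr (g h : Int × Int → Int) (H : ∀ p, pvOK p → g p = h p) :
    pvGridOf g = pvGridOf h := by
  simp only [pvGridOf, pvRange4, List.map_cons, List.map_nil]
  rw [H (0,0) (by norm_num [pvOK]), H (0,1) (by norm_num [pvOK]), H (0,2) (by norm_num [pvOK]), H (0,3) (by norm_num [pvOK]), H (1,0) (by norm_num [pvOK]), H (1,1) (by norm_num [pvOK]), H (1,2) (by norm_num [pvOK]), H (1,3) (by norm_num [pvOK]), H (2,0) (by norm_num [pvOK]), H (2,1) (by norm_num [pvOK]), H (2,2) (by norm_num [pvOK]), H (2,3) (by norm_num [pvOK]), H (3,0) (by norm_num [pvOK]), H (3,1) (by norm_num [pvOK]), H (3,2) (by norm_num [pvOK]), H (3,3) (by norm_num [pvOK])]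

-- writing one in-range cell of the grid = a pointwise function update
lemma pvStep (g : Int × Int → Int) (q : Int × Int) (v : Int) (hq : pvOK q) :
    pvSet2 (pvGridOf g) q.1 q.2 v = pvGridOf (fun p => if p = q then v else g p) := by
  obtain ⟨i, j⟩ := q
  obtain ⟨h1, h2, h3, h4⟩ := hq
  simp only [pvGridOf, pvRange4]
  interval_cases i <;> interval_cases j <;>
    simp [pvSet2, Prod.ext_iff]

lemma pvEnumAppend (xs ys : List Int) (s : Int) :
    PySem.List.enumerate (xs ++ ys) s
      = PySem.List.enumerate xs s ++ PySem.List.enumerate ys (s + xs.length) := by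
  induction xs generalizing s with
  | nil => simp [PySem.List.enumerate_nil]
  | cons x xs ih =>
    simp only [List.cons_append, PySem.List.enumerate_cons, ih, List.length_cons]
    have h : s + 1 + (xs.length : Int) = s + ((xs.length + 1 : Nat) : Int) := by push_cast; ring
    rw [h]

-- first-occurrence index in a nodup list is the only occurrence
lemma pvIndexNodup (tbl : List (Int × Int)) (hnd : tbl.Nodup) (k : Nat)
    (hk : k < tbl.length) : PySem.List.index? tbl tbl[k] = some k := by
  have hmem : tbl[k] ∈ tbl := List.getElem_mem hk
  have hsome := (PySem.List.index?_isSome_iff tbl tbl[k]).mpr hmem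
  obtain ⟨k', hk'⟩ := Option.isSome_iff_exists.mp hsome
  obtain ⟨hk'lt, heq, _⟩ := PySem.List.getElem_of_index?_eq_some hk'
  have : k' = k := (List.Nodup.getElem_inj_iff hnd).mp heq
  rw [hk', this]

-- the whole A-loop over enumerate xs, as a cell-function transformer
lemma pvLoop (tbl : List (Int × Int)) (htbl : ∀ p ∈ tbl, pvOK p) (hnd : tbl.Nodup) :
    ∀ (xs : List Int), xs.length ≤ tbl.length → ∀ (g : Int × Int → Int),
      (PySem.List.enumerate xs).foldl
        (fun st ke =>
          pvSet2 st (PySem.List.pyGetD tbl ke.1 (0, 0)).1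
            (PySem.List.pyGetD tbl ke.1 (0, 0)).2 ke.2) (pvGridOf g)
      = pvGridOf (pvAfter tbl xs g) := by
  intro xs
  induction xs using List.reverseRecOn with
  | nil =>
    intro _ g
    simp only [PySem.List.enumerate_nil, List.foldl_nil]
    apply congrArg
    funext p
    unfold pvAfter
    cases PySem.List.index? tbl p with
    | none => rfl
    | some k => simp
  | append_singleton xs x ih =>
    intro hlen g
    have hxs : xs.length < tbl.length := by simp at hlen; omega
    rw [pvEnumAppend, List.foldl_append, ih (by omega) g]
    have hq : PySem.List.pyGetD tbl ((0 : Int) + xs.length) (0, 0) = tbl[xs.length] := by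
      have : (0 : Int) + xs.length = (xs.length : Int) := by ring
      rw [this, PySem.List.pyGetD_natCast, List.getD_eq_getElem _ _ hxs]
    simp only [PySem.List.enumerate_cons, PySem.List.enumerate_nil, List.foldl_cons, List.foldl_nil, hq]
    rw [pvStep _ _ _ (htbl _ (List.getElem_mem hxs))]
    apply pvGridOf_congr
    intro p _
    by_cases hpq : p = tbl[xs.length]
    · rw [if_pos hpq]
      unfold pvAfter
      rw [hpq, pvIndexNodup tbl hnd _ hxs]
      dsimp only
      rw [if_pos (by simp only [List.length_append, List.length_cons, List.length_nil]; push_cast; omega),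
        PySem.List.pyGetD_natCast]
      simp [List.getD_eq_getElem?_getD]
    · rw [if_neg hpq]
      unfold pvAfter
      cases h : PySem.List.index? tbl p with
      | none => rfl
      | some k =>
        dsimp only
        obtain ⟨hklt, heq, -⟩ := PySem.List.getElem_of_index?_eq_some h
        have hkne : k ≠ xs.length := by
          intro hk0
          subst hk0
          exact hpq heq.symm
        by_cases hkx : (k : Int) < xs.length
        · have hklen : k < xs.length := by exact_mod_cast hkx
          rw [if_pos hkx,
            if_pos (by simp only [List.length_append, List.length_cons, List.length_nil]; omega),
            PySem.List.pyGetD_natCast, PySem.List.pyGetD_natCast,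
            List.getD_eq_getElem _ _ hklen,
            List.getD_eq_getElem _ _ (by simp only [List.length_append, List.length_cons, List.length_nil]; omega),
            List.getElem_append_left]
        · rw [if_neg hkx,
            if_neg (by simp only [List.length_append, List.length_cons, List.length_nil]; push_cast at hkx ⊢; omega)]

lemma pvGrid0 :
    ((List.range 4).map (fun _ => (List.range 4).map (fun _ => (0 : Int))))
      = pvGridOf (fun _ => 0) := by decide

lemma pvBLok : ∀ p ∈ pvBoundarylist, pvOK p := by
  intro p hp; fin_cases hp <;> norm_num [pvOK]
lemma pvTLok : ∀ p ∈ pvTilelist, pvOK p := by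
  intro p hp; fin_cases hp <;> norm_num [pvOK]

-- ===== VERDICT (by name: the statement is the Claim_ definition above) =====
theorem statefrombinary_spec : Claim_equal_statefrombinary := by
  intro boundary tile _ hpre
  obtain ⟨hb, ht⟩ := hpre
  unfold Spec_statefrombinary statefrombinary statefrombinary_alt
  simp only []
  rw [pvGrid0,
    pvLoop pvBoundarylist pvBLok (by decide) boundary (by simpa [pvBoundarylist] using hb) _,
    pvLoop pvTilelist pvTLok (by decide) tile (by simpa [pvTilelist] using ht) _]
  show pvGridOf _ = pvGridOf (pvCellB boundary tile)
  apply pvGridOf_congr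
  intro p _
  unfold pvAfter pvCellB
  cases h : PySem.List.index? pvTilelist p with
  | some k =>
    by_cases hk : (k : Int) < tile.length
    · simp [hk]
    · have hmem : p ∈ pvTilelist := (PySem.List.index?_isSome_iff pvTilelist p).mp (by rw [h]; rfl)
      have hnone : List.idxOf? p pvBoundarylist = none := by
        rw [← PySem.List.index?_eq_idxOf?, PySem.List.index?_eq_none_iff]
        fin_cases hmem <;> decide
      simp [hk, hnone]
  | none =>
    cases h2 : PySem.List.index? pvBoundarylist p with
    | some k => simp
    | none => rfl
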